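-- pv_equiv track=rewrite | github.com/LeeGukHeon/AutoLife | legacy_archive/scripts/generate_parity_invariant_report.py | ordering_flags
-- ===== SOURCE A (Python) =====
-- from typing import Any, Dict, Iterable, List, Optional, Tuple
--
-- def ordering_flags(timestamps: List[int]) -> Dict[str, bool]:
--     if len(timestamps) <= 1:
--         return {
--             "raw_monotonic_non_decreasing": True,
--             "raw_monotonic_non_increasing": True,
--             "raw_strictly_increasing": True,
--             "raw_strictly_decreasing": True,
--         }
--     non_dec = all(timestamps[i] >= timestamps[i - 1] for i in range(1, len(timestamps)))
--     non_inc = all(timestamps[i] <= timestamps[i - 1] for i in range(1, len(timestamps)))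
--     strict_inc = all(timestamps[i] > timestamps[i - 1] for i in range(1, len(timestamps)))
--     strict_dec = all(timestamps[i] < timestamps[i - 1] for i in range(1, len(timestamps)))
--     return {
--         "raw_monotonic_non_decreasing": non_dec,
--         "raw_monotonic_non_increasing": non_inc,
--         "raw_strictly_increasing": strict_inc,
--         "raw_strictly_decreasing": strict_dec,
--     }
-- ===== SOURCE B (Python) =====
-- def ordering_flags(timestamps):
--     nd = ni = si = sd = True
--     for prev, cur in zip(timestamps, timestamps[1:]):
--         nd = nd and cur >= prev
--         ni = ni and cur <= prev
--         si = si and cur > prev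
--         sd = sd and cur < prev
--     return {
--         "raw_monotonic_non_decreasing": nd,
--         "raw_monotonic_non_increasing": ni,
--         "raw_strictly_increasing": si,
--         "raw_strictly_decreasing": sd,
--     }
-- ===== Notes on version B (the rewrite author's own statement) =====
-- stated objective: simpler
-- what changed: Replaces four separate index-based generator scans (plus a special case for short lists) with a single pass over adjacent pairs via zip, updating all four flags at once; the short-list branch disappears because an empty loop leaves all flags True.
import Mathlib
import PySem

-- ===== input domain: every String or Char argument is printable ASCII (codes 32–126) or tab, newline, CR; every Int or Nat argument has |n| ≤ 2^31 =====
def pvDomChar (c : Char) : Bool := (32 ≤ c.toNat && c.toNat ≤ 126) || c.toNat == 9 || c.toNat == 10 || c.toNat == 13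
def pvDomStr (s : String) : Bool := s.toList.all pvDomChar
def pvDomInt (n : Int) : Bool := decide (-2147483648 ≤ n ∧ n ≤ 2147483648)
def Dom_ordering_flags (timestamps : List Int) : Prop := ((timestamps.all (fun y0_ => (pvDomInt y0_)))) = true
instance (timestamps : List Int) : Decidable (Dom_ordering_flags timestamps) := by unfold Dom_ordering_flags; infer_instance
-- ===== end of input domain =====

-- B replaces A's four index-based adjacent scans (and its short-list special case)
-- with a single fold over zipped adjacent pairs updating all four flags at once (simpler).


-- ===== PORT A =====
def ordering_flags (timestamps : List Int) : List (String × Bool) :=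
  if timestamps.length ≤ 1 then
    [("raw_monotonic_non_decreasing", true),
     ("raw_monotonic_non_increasing", true),
     ("raw_strictly_increasing", true),
     ("raw_strictly_decreasing", true)]
  else
    let nonDec := (PySem.List.pyRange 1 (timestamps.length : Int) 1).all
      (fun i => decide (PySem.List.pyGetD timestamps i 0 ≥ PySem.List.pyGetD timestamps (i - 1) 0))
    let nonInc := (PySem.List.pyRange 1 (timestamps.length : Int) 1).all
      (fun i => decide (PySem.List.pyGetD timestamps i 0 ≤ PySem.List.pyGetD timestamps (i - 1) 0))
    let strictInc := (PySem.List.pyRange 1 (timestamps.length : Int) 1).all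
      (fun i => decide (PySem.List.pyGetD timestamps i 0 > PySem.List.pyGetD timestamps (i - 1) 0))
    let strictDec := (PySem.List.pyRange 1 (timestamps.length : Int) 1).all
      (fun i => decide (PySem.List.pyGetD timestamps i 0 < PySem.List.pyGetD timestamps (i - 1) 0))
    [("raw_monotonic_non_decreasing", nonDec),
     ("raw_monotonic_non_increasing", nonInc),
     ("raw_strictly_increasing", strictInc),
     ("raw_strictly_decreasing", strictDec)]

-- ===== PORT B =====
def ordering_flags_alt (timestamps : List Int) : List (String × Bool) :=
  let st := (timestamps.zip (PySem.List.slice timestamps (some 1) none)).foldl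
    (fun (s : Bool × Bool × Bool × Bool) p =>
      (s.1 && decide (p.2 ≥ p.1),
       s.2.1 && decide (p.2 ≤ p.1),
       s.2.2.1 && decide (p.2 > p.1),
       s.2.2.2 && decide (p.2 < p.1)))
    (true, true, true, true)
  [("raw_monotonic_non_decreasing", st.1),
   ("raw_monotonic_non_increasing", st.2.1),
   ("raw_strictly_increasing", st.2.2.1),
   ("raw_strictly_decreasing", st.2.2.2)]

-- ===== PRECONDITION & SPEC =====
def Spec_ordering_flags (timestamps : List Int) (out : List (String × Bool)) : Prop := out = ordering_flags_alt timestamps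
instance (timestamps : List Int) (out : List (String × Bool)) : Decidable (Spec_ordering_flags timestamps out) := by unfold Spec_ordering_flags; infer_instance

-- ===== CLAIM (what is proved, stated in full; the proofs are below) =====
def Claim_equal_ordering_flags : Prop := ∀ (timestamps : List Int), Dom_ordering_flags timestamps → Spec_ordering_flags timestamps (ordering_flags timestamps)

-- ===== LEMMAS AND PROOFS =====

-- B's fold splits into four independent Boolean conjunctions.
lemma fold4_eq (r1 r2 r3 r4 : Int × Int → Bool) (l : List (Int × Int)) :
    ∀ s1 s2 s3 s4 : Bool,
      l.foldl (fun (s : Bool × Bool × Bool × Bool) p =>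
          (s.1 && r1 p, s.2.1 && r2 p, s.2.2.1 && r3 p, s.2.2.2 && r4 p))
        (s1, s2, s3, s4)
      = (s1 && l.all r1, s2 && l.all r2, s3 && l.all r3, s4 && l.all r4) := by
  induction l with
  | nil => simp
  | cons p l ih =>
      intro s1 s2 s3 s4
      simp [List.foldl_cons, ih, Bool.and_assoc]

-- adjacency via indices equals adjacency via zip with the tail
lemma range_adj_eq_zip (r : Int → Int → Bool) :
    ∀ ts : List Int,
      ((List.range (ts.length - 1)).all
        (fun k => r (ts.getD k 0) (ts.getD (k + 1) 0)))
      = (ts.zip ts.tail).all (fun p => r p.1 p.2) := by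
  intro ts
  induction ts with
  | nil => simp
  | cons a ts ih =>
      cases ts with
      | nil => simp
      | cons b ts =>
          simp only [List.length_cons, Nat.add_sub_cancel, List.tail_cons,
            List.getD_cons_succ] at ih
          simp only [List.length_cons, Nat.add_sub_cancel, List.range_succ_eq_map,
            List.all_cons, List.all_map, List.tail_cons, List.zip_cons_cons,
            Function.comp_def, List.getD_cons_succ, List.getD_cons_zero]
          rw [ih]

-- A's index-based scan over range(1, len) equals the zip-pair scan
lemma pyRange_adj_eq_zip (r : Int → Int → Bool) (ts : List Int) :
    ((PySem.List.pyRange 1 (ts.length : Int) 1).all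
      (fun i => r (PySem.List.pyGetD ts (i - 1) 0) (PySem.List.pyGetD ts i 0)))
    = (ts.zip ts.tail).all (fun p => r p.1 p.2) := by
  rw [PySem.List.pyRange_one]
  have hlen : ((ts.length : Int) - 1).toNat = ts.length - 1 := by omega
  rw [hlen, List.all_map]
  rw [← range_adj_eq_zip r ts]
  apply List.all_congr rfl
  intro k
  have h2 : (1 : Int) + (k : Int) = (((k + 1 : Nat)) : Int) := by push_cast; ring
  have h3 : (((k + 1 : Nat)) : Int) - 1 = ((k : Nat) : Int) := by push_cast; ring
  simp only [Function.comp_def, h2, h3, PySem.List.pyGetD_natCast,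
    List.getD_eq_getElem?_getD]

-- ===== VERDICT (by name: the statement is the Claim_ definition above) =====
theorem ordering_flags_spec : Claim_equal_ordering_flags := by
  intro ts _
  show ordering_flags ts = ordering_flags_alt ts
  unfold ordering_flags ordering_flags_alt
  have hsl : PySem.List.slice ts (some 1) none = ts.tail := by
    have h := PySem.List.slice_from ts (a := 1) (by norm_num)
    rw [h]; simp
  rw [hsl,
    fold4_eq (fun p => decide (p.2 ≥ p.1)) (fun p => decide (p.2 ≤ p.1))
      (fun p => decide (p.2 > p.1)) (fun p => decide (p.2 < p.1)) (ts.zip ts.tail)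
      true true true true]
  by_cases h : ts.length ≤ 1
  · rw [if_pos h]
    match ts, h with
    | [], _ => simp
    | [a], _ => simp
  · rw [if_neg h]
    simp only [Bool.true_and]
    rw [pyRange_adj_eq_zip (fun a b => decide (b ≥ a)),
        pyRange_adj_eq_zip (fun a b => decide (b ≤ a)),
        pyRange_adj_eq_zip (fun a b => decide (b > a)),
        pyRange_adj_eq_zip (fun a b => decide (b < a))]
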